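-- pv_equiv track=rewrite | github.com/niagl/Similarity-Analysis | phase3_project/code/task2b.py | preserve_cluster_balance
-- ===== SOURCE A (Python) =====
-- def preserve_cluster_balance(clusters):
-- 	"""
-- 	returns -1 if a given node is not a cluster head already.
-- 	returns the new cluster head ensuring that balance between clusters is maintained, controlled by
-- 	inter_cluster_threshold.
-- 	"""
-- 	inter_cluster_threshold = 100
-- 	cluster_length_map = {}
-- 	for key, value in clusters.items():
-- 		cluster_length_map[key] = len(value)
-- 	cluster_lengths = list(cluster_length_map.values())
-- 	cluster_lengths.sort()
--
-- 	if cluster_lengths[-1] - cluster_lengths[0] > inter_cluster_threshold: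
-- 		for key, value in clusters.items():
-- 			if len(value) == cluster_lengths[0]:
-- 				return key
--
-- 	return -1
-- ===== SOURCE B (Python) =====
-- def preserve_cluster_balance(clusters):
--     min_len = None
--     max_len = None
--     min_key = -1
--     for key, value in clusters.items():
--         n = len(value)
--         if min_len is None or n < min_len:
--             min_len = n
--             min_key = key
--         if max_len is None or max_len < n:
--             max_len = n
--     if min_len is not None and max_len - min_len > 100:
--         return min_key
--     return -1
-- ===== Notes on version B (the rewrite author's own statement) =====
-- stated objective: simpler
-- what changed: One pass tracking running min length, max length and the key of the first minimum-length cluster, instead of building a length map, sorting its values and rescanning the dict for the first matching key.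
-- outside the precondition, e.g. on preserve_cluster_balance({}): A raises IndexError, B returns -1
-- crash fix: On an empty clusters dict A raises IndexError (indexing the empty sorted length list); B returns -1. — e.g. on preserve_cluster_balance([]): A raises IndexError, B returns -1
import Mathlib
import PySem

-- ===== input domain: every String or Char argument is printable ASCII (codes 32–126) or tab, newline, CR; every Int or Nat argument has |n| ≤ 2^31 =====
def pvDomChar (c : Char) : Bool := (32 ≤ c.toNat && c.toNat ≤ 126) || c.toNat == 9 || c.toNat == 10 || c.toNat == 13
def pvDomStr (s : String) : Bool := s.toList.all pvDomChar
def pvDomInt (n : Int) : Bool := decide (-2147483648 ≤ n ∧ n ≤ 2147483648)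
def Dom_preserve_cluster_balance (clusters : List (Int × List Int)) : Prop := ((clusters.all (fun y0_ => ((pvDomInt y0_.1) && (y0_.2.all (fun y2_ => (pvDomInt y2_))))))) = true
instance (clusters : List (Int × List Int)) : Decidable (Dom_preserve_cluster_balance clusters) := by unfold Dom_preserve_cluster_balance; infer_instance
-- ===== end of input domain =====

-- B replaces A's build-map / sort / rescan with one pass tracking the running min length,
-- max length and the key of the first minimum-length cluster (objective: simpler).

-- ===== PORT A =====
-- clusters is a Python dict; the association list is marshalled through PySem.Dict.ofList
-- (overwrite keeps position), so .items is exactly clusters.items().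
def preserve_cluster_balance (clusters : List (Int × List Int)) : Int :=
  let items := (PySem.Dict.ofList clusters).items
  -- for key, value in clusters.items(): cluster_length_map[key] = len(value)
  let cluster_length_map :=
    items.foldl (fun d kv => d.insert kv.1 ((kv.2.length : Int))) (PySem.Dict.empty)
  -- cluster_lengths = list(...values()); cluster_lengths.sort()
  let cluster_lengths := PySem.List.sorted cluster_length_map.values (fun x => x) false
  match PySem.List.pyGet? cluster_lengths (-1), PySem.List.pyGet? cluster_lengths 0 with
  | some hi, some lo =>
      if hi - lo > 100 then
        -- for key, value in clusters.items(): if len(value) == cluster_lengths[0]: return key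
        match items.find? (fun kv => ((kv.2.length : Int) == lo)) with
        | some kv => kv.1
        | none => -1
      else -1
  | _, _ => 0   -- IndexError on the empty dict: excluded by Pre_

-- ===== PORT B =====
-- one iteration of B's loop body over state (min_len, max_len, min_key)
def pvBStep (st : Option Int × Option Int × Int) (kv : Int × List Int) :
    Option Int × Option Int × Int :=
  let n : Int := kv.2.length
  let mnk : Option Int × Int :=
    match st.1 with
    | none => (some n, kv.1)
    | some m => if n < m then (some n, kv.1) else (some m, st.2.2)
  let mx : Option Int :=
    match st.2.1 with
    | none => some n
    | some M => if M < n then some n else some M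
  (mnk.1, mx, mnk.2)

def preserve_cluster_balance_alt (clusters : List (Int × List Int)) : Int :=
  let items := (PySem.Dict.ofList clusters).items
  let st := items.foldl pvBStep (none, none, -1)
  -- if min_len is not None and max_len - min_len > 100: return min_key
  match st.1 with
  | none => -1
  | some m =>
    match st.2.1 with
    | none => -1
    | some M => if M - m > 100 then st.2.2 else -1

-- ===== PRECONDITION & SPEC =====
-- A raises IndexError on the empty dict (it indexes the empty sorted length list); Pre_ excludes exactly that input.
def Pre_preserve_cluster_balance (clusters : List (Int × List Int)) : Prop := clusters ≠ []
instance (clusters : List (Int × List Int)) : Decidable (Pre_preserve_cluster_balance clusters) := by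
  unfold Pre_preserve_cluster_balance; infer_instance

def pvWitness_preserve_cluster_balance : (List (Int × List Int)) := [(1, [7]), (2, [])]

-- On the empty clusters dict A raises IndexError and B returns -1.
def Raises_preserve_cluster_balance (clusters : List (Int × List Int)) : Prop := clusters = []
instance (clusters : List (Int × List Int)) : Decidable (Raises_preserve_cluster_balance clusters) := by
  unfold Raises_preserve_cluster_balance; infer_instance
def pvRaiseWitness_preserve_cluster_balance : (List (Int × List Int)) := []
def pvRaiseWitnessOut_preserve_cluster_balance : Int := -1

def Spec_preserve_cluster_balance (clusters : List (Int × List Int)) (out : Int) : Prop :=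
  out = preserve_cluster_balance_alt clusters
instance (clusters : List (Int × List Int)) (out : Int) : Decidable (Spec_preserve_cluster_balance clusters out) := by
  unfold Spec_preserve_cluster_balance; infer_instance

-- ===== CLAIM (what is proved, stated in full; the proofs are below) =====
def Claim_equal_preserve_cluster_balance : Prop :=
  ∀ (clusters : List (Int × List Int)), Dom_preserve_cluster_balance clusters →
    Pre_preserve_cluster_balance clusters →
    Spec_preserve_cluster_balance clusters (preserve_cluster_balance clusters)

def Claim_raises_preserve_cluster_balance : Prop :=
  (∀ (clusters : List (Int × List Int)), Dom_preserve_cluster_balance clusters →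
      Raises_preserve_cluster_balance clusters → ¬ Pre_preserve_cluster_balance clusters) ∧
  (Dom_preserve_cluster_balance (pvRaiseWitness_preserve_cluster_balance) ∧
   Raises_preserve_cluster_balance (pvRaiseWitness_preserve_cluster_balance) ∧
   preserve_cluster_balance_alt (pvRaiseWitness_preserve_cluster_balance) = pvRaiseWitnessOut_preserve_cluster_balance)

-- ===== LEMMAS AND PROOFS =====

-- the invariant of B's single pass over a nonempty item list
lemma pvBFold_spec (p : List (Int × List Int)) (hp : p ≠ []) :
    ∃ m M k, p.foldl pvBStep (none, none, -1) = (some m, some M, k) ∧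
      (∀ kv ∈ p, m ≤ (kv.2.length : Int) ∧ (kv.2.length : Int) ≤ M) ∧
      m ∈ p.map (fun kv => (kv.2.length : Int)) ∧
      M ∈ p.map (fun kv => (kv.2.length : Int)) ∧
      ∃ v, p.find? (fun kv => ((kv.2.length : Int) == m)) = some (k, v) := by
  induction p using List.reverseRecOn with
  | nil => exact absurd rfl hp
  | append_singleton p x ih =>
    rcases eq_or_ne p [] with hpe | hpe
    · subst hpe
      refine ⟨(x.2.length : Int), (x.2.length : Int), x.1, ?_, ?_, ?_, ?_, ⟨x.2, ?_⟩⟩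
      · simp [pvBStep]
      · intro kv hkv; simp at hkv; subst hkv; exact ⟨le_refl _, le_refl _⟩
      · simp
      · simp
      · simp
    · obtain ⟨m, M, k, hfold, hbnd, hmmem, hMmem, v, hfind⟩ := ih hpe
      rw [List.foldl_append, hfold]
      set n : Int := (x.2.length : Int) with hn
      by_cases hlt : n < m
      · -- new minimum at x
        refine ⟨n, if M < n then n else M, x.1, ?_, ?_, ?_, ?_, ⟨x.2, ?_⟩⟩
        · simp [pvBStep, hlt, ← hn]; split_ifs <;> simp
        · intro kv hkv
          rcases List.mem_append.1 hkv with h | h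
          · have := hbnd kv h
            constructor
            · exact le_trans (le_of_lt hlt) this.1
            · split_ifs with hMn
              · exact le_trans this.2 (le_of_lt hMn)
              · exact this.2
          · simp at h; subst h
            constructor
            · exact le_refl _
            · split_ifs with hMn
              · exact le_refl _
              · omega
        · simp; exact Or.inr hn
        · by_cases hMn : M < n
          · simp [hMn]; exact Or.inr hn
          · simp [hMn]; left; simpa using hMmem
        · rw [List.find?_append]
          have hnone : p.find? (fun kv => ((kv.2.length : Int) == n)) = none := by
            rw [List.find?_eq_none]
            intro kv hkv
            have := (hbnd kv hkv).1
            simp only [beq_iff_eq]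
            omega
          simp only [hnone, Option.none_or]
          simp [← hn]
      · -- old minimum survives
        refine ⟨m, if M < n then n else M, k, ?_, ?_, ?_, ?_, ⟨v, ?_⟩⟩
        · simp [pvBStep, hlt, ← hn]; split_ifs <;> simp
        · intro kv hkv
          rcases List.mem_append.1 hkv with h | h
          · have := hbnd kv h
            refine ⟨this.1, ?_⟩
            split_ifs with hMn
            · exact le_trans this.2 (le_of_lt hMn)
            · exact this.2
          · simp at h; subst h
            refine ⟨not_lt.1 hlt, ?_⟩
            split_ifs with hMn
            · exact le_refl _
            · exact not_lt.1 hMn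
        · rw [List.map_append]; exact List.mem_append.2 (Or.inl hmmem)
        · by_cases hMn : M < n
          · simp [hMn]; exact Or.inr hn
          · simp [hMn]; left; simpa using hMmem
        · rw [List.find?_append, hfind]; rfl

-- the last element of a ≤-pairwise list bounds every element
lemma pvLast_ge (s : List Int) (hs : s ≠ []) (hp : s.Pairwise (· ≤ ·)) :
    ∀ y ∈ s, y ≤ s.getLast hs := by
  induction s with
  | nil => exact absurd rfl hs
  | cons a t ih =>
    intro y hy
    rcases eq_or_ne t [] with hte | hte
    · subst hte; simp at hy; subst hy; simp
    · rw [List.getLast_cons hte]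
      simp only [List.mem_cons] at hy
      rcases hy with rfl | hy
      · exact (List.pairwise_cons.1 hp).1 _ (List.getLast_mem hte)
      · exact ih hte (List.pairwise_cons.1 hp).2 y hy

-- items of ofList of a nonempty list is nonempty
lemma pvItems_ne_nil (clusters : List (Int × List Int)) (hc : clusters ≠ []) :
    (PySem.Dict.ofList clusters).items ≠ [] := by
  obtain ⟨c, rest, rfl⟩ := List.exists_cons_of_ne_nil hc
  intro h
  have hk : (PySem.Dict.ofList (c :: rest)).keys = [] := by
    show (PySem.Dict.ofList (c :: rest)).items.map Prod.fst = []
    rw [h]; rfl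
  have : c.1 ∈ (PySem.Dict.ofList (c :: rest)).keys := by
    show c.1 ∈ (PySem.Dict.update PySem.Dict.empty (c :: rest)).keys
    unfold PySem.Dict.update
    rw [PySem.Dict.keys_foldl_insert_key (c :: rest) Prod.fst (fun _ p => p.2) PySem.Dict.empty]
    exact (PySem.Set.mem_update _ _ _).2 (Or.inr (by simp))
  rw [hk] at this
  simp at this

-- ===== VERDICT =====
theorem preserve_cluster_balance_spec : Claim_equal_preserve_cluster_balance := by
  intro clusters _ hpre
  have hine : (PySem.Dict.ofList clusters).items ≠ [] := pvItems_ne_nil clusters hpre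
  obtain ⟨m, M, k, hfold, hbnd, hmmem, hMmem, v, hfind⟩ :=
    pvBFold_spec (PySem.Dict.ofList clusters).items hine
  -- A's cluster_length_map has values = items.map length
  have hfresh : ∀ a ∈ (PySem.Dict.ofList clusters).items,
      (PySem.Dict.empty : PySem.Dict Int Int).contains a.1 = false := by
    intro a _; simp [PySem.Dict.contains_empty]
  have hnodup : ((PySem.Dict.ofList clusters).items.map Prod.fst).Nodup := by
    have := PySem.Dict.nodup_keys_ofList clusters
    simpa [PySem.Dict.keys] using this
  have hvals :
      ((PySem.Dict.ofList clusters).items.foldl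
          (fun d kv => d.insert kv.1 ((kv.2.length : Int))) (PySem.Dict.empty)).values
        = (PySem.Dict.ofList clusters).items.map (fun kv => (kv.2.length : Int)) := by
    show ((PySem.Dict.ofList clusters).items.foldl
          (fun d kv => d.insert kv.1 ((kv.2.length : Int))) (PySem.Dict.empty)).items.map Prod.snd
        = (PySem.Dict.ofList clusters).items.map (fun kv => (kv.2.length : Int))
    have := PySem.Dict.items_foldl_insert_fresh (PySem.Dict.ofList clusters).items Prod.fst
      (fun kv => ((kv.2.length : Int))) PySem.Dict.empty hfresh hnodup
    rw [this]
    simp [List.map_map, PySem.Dict.empty, Function.comp]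
  unfold Spec_preserve_cluster_balance
  simp only [preserve_cluster_balance, preserve_cluster_balance_alt]
  rw [hvals, hfold]
  set lens := (PySem.Dict.ofList clusters).items.map (fun kv => (kv.2.length : Int)) with hlens
  set s := PySem.List.sorted lens (fun x => x) false with hs
  have hperm : s.Perm lens := PySem.List.sorted_perm lens (fun x => x) false
  have hlne : lens ≠ [] := by simp [hlens, hine]
  have hsne : s ≠ [] := by
    intro h
    have hl := hperm.length_eq
    rw [h] at hl
    exact hlne (List.eq_nil_of_length_eq_zero hl.symm)
  obtain ⟨h0, t, hst⟩ := List.exists_cons_of_ne_nil hsne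
  have hpw : s.Pairwise (· ≤ ·) := by
    have := PySem.List.sorted_pairwise lens (fun x => x)
    simpa [hs] using this
  have hhead_le : ∀ y ∈ lens, h0 ≤ y := fun y hy =>
    PySem.List.key_head_sorted_le lens (fun x => x) hst y hy
  have hh0mem : h0 ∈ lens := by
    refine (PySem.List.mem_sorted lens (fun x => x) false h0).1 ?_
    rw [← hs, hst]; exact List.mem_cons_self
  have hm_le_all : ∀ y ∈ lens, m ≤ y := by
    intro y hy
    rw [hlens] at hy
    obtain ⟨kv, hkv, rfl⟩ := List.mem_map.1 hy
    exact (hbnd kv hkv).1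
  have hm : h0 = m := le_antisymm (hhead_le m hmmem) (hm_le_all h0 hh0mem)
  have hlast_mem : s.getLast hsne ∈ lens := by
    refine (PySem.List.mem_sorted lens (fun x => x) false _).1 ?_
    rw [← hs]; exact List.getLast_mem hsne
  have hall_le_last : ∀ y ∈ lens, y ≤ s.getLast hsne := fun y hy =>
    pvLast_ge s hsne hpw y ((PySem.List.mem_sorted lens (fun x => x) false y).2 hy)
  have hall_le_M : ∀ y ∈ lens, y ≤ M := by
    intro y hy
    rw [hlens] at hy
    obtain ⟨kv, hkv, rfl⟩ := List.mem_map.1 hy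
    exact (hbnd kv hkv).2
  have hM : s.getLast hsne = M := le_antisymm (hall_le_M _ hlast_mem) (hall_le_last M hMmem)
  rw [PySem.List.pyGet?_neg_one, List.getLast?_eq_getLast_of_ne_nil hsne, hM,
      hst, PySem.List.pyGet?_zero_cons, hm]
  by_cases hgt : M - m > 100
  · simp [hgt, hfind]
  · simp [hgt]

def preserve_cluster_balance_raises : Claim_raises_preserve_cluster_balance := by
  unfold Claim_raises_preserve_cluster_balance
  exact ⟨fun clusters _ hr hp => hp hr, by decide⟩
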